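-- pv_equiv track=rewrite | github.com/endomorphosis/ipfs_datasets_py | ipfs_datasets_py/caselaw_graphrag.py | _categorize_concept
-- ===== SOURCE A (Python) =====
-- def _categorize_concept(concept: str) -> str:
--     """Categorize legal concepts"""
--     concept_lower = concept.lower()
--
--     if any(word in concept_lower for word in ['amendment', 'constitutional', 'constitution']):
--         return 'constitutional_law'
--     elif any(word in concept_lower for word in ['criminal', 'procedure', 'miranda', 'search', 'seizure']):
--         return 'criminal_law'
--     elif any(word in concept_lower for word in ['civil', 'rights', 'discrimination', 'equal']):
--         return 'civil_rights'
--     elif any(word in concept_lower for word in ['commerce', 'regulation', 'interstate']):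
--         return 'commercial_law'
--     else:
--         return 'general_law'
-- ===== SOURCE B (Python) =====
-- _KEYWORD_PRIORITY = {
--     'amendment': 0, 'constitutional': 0, 'constitution': 0,
--     'criminal': 1, 'procedure': 1, 'miranda': 1, 'search': 1, 'seizure': 1,
--     'civil': 2, 'rights': 2, 'discrimination': 2, 'equal': 2,
--     'commerce': 3, 'regulation': 3, 'interstate': 3,
-- }
-- _CATEGORIES = ['constitutional_law', 'criminal_law', 'civil_rights',
--                'commercial_law', 'general_law']
--
-- def _categorize_concept(concept: str) -> str:
--     cl = concept.lower()
--     best = 4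
--     for word, pri in _KEYWORD_PRIORITY.items():
--         if pri < best and word in cl:
--             best = pri
--     return _CATEGORIES[best]
-- ===== Notes on version B (the rewrite author's own statement) =====
-- stated objective: alternative
-- what changed: Replaces A's early-return if/elif cascade of per-category any() checks with a single full pass over a keyword->priority map that computes the minimum priority among all matching keywords, then indexes a category list by that minimum.
import Mathlib
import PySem

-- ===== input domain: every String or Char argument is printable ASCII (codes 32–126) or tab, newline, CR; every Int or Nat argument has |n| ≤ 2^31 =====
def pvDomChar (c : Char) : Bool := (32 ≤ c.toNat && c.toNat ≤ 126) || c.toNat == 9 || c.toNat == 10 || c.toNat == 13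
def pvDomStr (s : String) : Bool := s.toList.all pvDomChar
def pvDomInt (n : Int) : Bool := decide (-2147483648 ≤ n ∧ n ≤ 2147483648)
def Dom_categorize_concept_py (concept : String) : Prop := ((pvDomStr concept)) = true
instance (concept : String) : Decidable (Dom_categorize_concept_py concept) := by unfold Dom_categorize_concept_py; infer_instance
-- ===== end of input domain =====

-- B replaces A's early-return if/elif cascade by a single full pass computing the minimum
-- priority over all matching keywords (min-accumulator fold), then an index lookup; same behaviour.

-- ===== PORT A =====
def categorize_concept_py (concept : String) : String :=
  let concept_lower := PySem.Str.lower concept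
  if ["amendment", "constitutional", "constitution"].any (fun word => PySem.Str.isIn word concept_lower) then
    "constitutional_law"
  else if ["criminal", "procedure", "miranda", "search", "seizure"].any (fun word => PySem.Str.isIn word concept_lower) then
    "criminal_law"
  else if ["civil", "rights", "discrimination", "equal"].any (fun word => PySem.Str.isIn word concept_lower) then
    "civil_rights"
  else if ["commerce", "regulation", "interstate"].any (fun word => PySem.Str.isIn word concept_lower) then
    "commercial_law"
  else
    "general_law"

-- ===== PORT B =====
-- the _KEYWORD_PRIORITY dict of Source B, in insertion order
def pvKeywordPriority : List (String × Nat) :=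
  [("amendment", 0), ("constitutional", 0), ("constitution", 0),
   ("criminal", 1), ("procedure", 1), ("miranda", 1), ("search", 1), ("seizure", 1),
   ("civil", 2), ("rights", 2), ("discrimination", 2), ("equal", 2),
   ("commerce", 3), ("regulation", 3), ("interstate", 3)]

def pvCategories : List String :=
  ["constitutional_law", "criminal_law", "civil_rights", "commercial_law", "general_law"]

-- the loop body of Source B: 'if pri < best and word in cl: best = pri'
def pvStep (cl : String) (best : Nat) (wp : String × Nat) : Nat :=
  if wp.2 < best ∧ PySem.Str.isIn wp.1 cl then wp.2 else best

def categorize_concept_py_alt (concept : String) : String :=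
  let cl := PySem.Str.lower concept
  let best := pvKeywordPriority.foldl (pvStep cl) 4
  -- _CATEGORIES[best]; best ≤ 4 always, so the getD default is never used
  pvCategories.getD best ""

-- ===== PRECONDITION & SPEC =====
def Spec_categorize_concept_py (concept : String) (out : String) : Prop := out = categorize_concept_py_alt concept
instance (concept : String) (out : String) : Decidable (Spec_categorize_concept_py concept out) := by unfold Spec_categorize_concept_py; infer_instance

-- ===== CLAIM (what is proved, stated in full; the proofs are below) =====
def Claim_equal_categorize_concept_py : Prop := ∀ (concept : String), Dom_categorize_concept_py concept → Spec_categorize_concept_py concept (categorize_concept_py concept)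

-- ===== LEMMAS AND PROOFS =====

-- the min-accumulator fold over one group of keywords of equal priority p:
-- it lowers best to p exactly when p < best and some keyword of the group matches
theorem pvFoldl_group (cl : String) (ws : List String) (p b : Nat) :
    List.foldl (pvStep cl) b (ws.map (fun w => (w, p))) =
      if p < b ∧ ws.any (fun w => PySem.Str.isIn w cl) then p else b := by
  induction ws generalizing b with
  | nil => simp
  | cons w rest ih =>
    simp only [List.map_cons, List.foldl_cons, List.any_cons, Bool.or_eq_true, pvStep, ih]
    by_cases hm : PySem.Str.isIn w cl = true <;> by_cases hp : p < b <;>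
      simp only [hm, hp, if_false, Bool.false_eq_true, false_or, true_or,
        true_and, false_and, and_true] <;>
      split_ifs <;> simp_all

-- pvKeywordPriority as the concatenation of its four equal-priority groups
theorem pvKeywordPriority_eq :
    pvKeywordPriority =
      (["amendment", "constitutional", "constitution"].map (fun w => (w, 0))) ++
      (["criminal", "procedure", "miranda", "search", "seizure"].map (fun w => (w, 1))) ++
      (["civil", "rights", "discrimination", "equal"].map (fun w => (w, 2))) ++
      (["commerce", "regulation", "interstate"].map (fun w => (w, 3))) := by
  rfl

-- ===== VERDICT (by name: the statement is the Claim_ definition above) =====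
theorem categorize_concept_py_spec : Claim_equal_categorize_concept_py := by
  intro concept _
  unfold Spec_categorize_concept_py categorize_concept_py categorize_concept_py_alt
  rw [pvKeywordPriority_eq]
  simp only [List.foldl_append, pvFoldl_group]
  generalize (["amendment", "constitutional", "constitution"] : List String).any
      (fun w => PySem.Str.isIn w (PySem.Str.lower concept)) = g0
  generalize (["criminal", "procedure", "miranda", "search", "seizure"] : List String).any
      (fun w => PySem.Str.isIn w (PySem.Str.lower concept)) = g1
  generalize (["civil", "rights", "discrimination", "equal"] : List String).any
      (fun w => PySem.Str.isIn w (PySem.Str.lower concept)) = g2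
  generalize (["commerce", "regulation", "interstate"] : List String).any
      (fun w => PySem.Str.isIn w (PySem.Str.lower concept)) = g3
  revert g0 g1 g2 g3
  decide
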